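-- pv_equiv track=rewrite | github.com/ColinGamez/PTB-pokemon-team-builder- | PTB [PokeTeamBuilder v1.0]/src/features/pokemon_fusion_generator.py | _syllable_fusion
-- ===== SOURCE A (Python) =====
-- def _syllable_fusion(name1: str, name2: str) -> str:
--     """Fuse names based on syllable patterns."""
--     # Simple syllable detection (this could be more sophisticated)
--     vowels = "aeiouAEIOU"
--
--     def get_syllables(name):
--         syllables = []
--         current = ""
--         for char in name:
--             current += char
--             if char in vowels and len(current) >= 2:
--                 syllables.append(current)
--                 current = ""
--         if current:
--             syllables.append(current)
--         return syllables
--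
--     syl1 = get_syllables(name1)
--     syl2 = get_syllables(name2)
--
--     if len(syl1) >= 2 and len(syl2) >= 2:
--         return syl1[0] + syl2[-1]
--     else:
--         return name1[:3] + name2[-3:]
-- ===== SOURCE B (Python) =====
-- def _syllable_fusion(name1: str, name2: str) -> str:
--     """Fuse names based on syllable patterns."""
--     vowels = "aeiouAEIOU"
--
--     def breaks(name):
--         # break indices: a vowel ends a syllable unless it starts one
--         bs, bound = [], 0
--         for i, ch in enumerate(name):
--             if ch in vowels and i > bound:
--                 bs.append(i)
--                 bound = i + 1
--         return bs, bound
--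
--     bs1, bound1 = breaks(name1)
--     bs2, bound2 = breaks(name2)
--     count1 = len(bs1) + (1 if bound1 < len(name1) else 0)
--     count2 = len(bs2) + (1 if bound2 < len(name2) else 0)
--     if count1 >= 2 and count2 >= 2:
--         first = name1[:bs1[0] + 1]
--         if bound2 < len(name2):
--             last = name2[bound2:]
--         else:
--             last = name2[(bs2[-2] + 1 if len(bs2) >= 2 else 0):]
--         return first + last
--     return name1[:3] + name2[-3:]
-- ===== Notes on version B (the rewrite author's own statement) =====
-- stated objective: alternative
-- what changed: B never builds the list of syllable substrings: it records only the break indices (plus the final segment start) in one pass and slices the first/last syllable directly from the names, instead of A's accumulator state machine that materialises every syllable string.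
import Mathlib
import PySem

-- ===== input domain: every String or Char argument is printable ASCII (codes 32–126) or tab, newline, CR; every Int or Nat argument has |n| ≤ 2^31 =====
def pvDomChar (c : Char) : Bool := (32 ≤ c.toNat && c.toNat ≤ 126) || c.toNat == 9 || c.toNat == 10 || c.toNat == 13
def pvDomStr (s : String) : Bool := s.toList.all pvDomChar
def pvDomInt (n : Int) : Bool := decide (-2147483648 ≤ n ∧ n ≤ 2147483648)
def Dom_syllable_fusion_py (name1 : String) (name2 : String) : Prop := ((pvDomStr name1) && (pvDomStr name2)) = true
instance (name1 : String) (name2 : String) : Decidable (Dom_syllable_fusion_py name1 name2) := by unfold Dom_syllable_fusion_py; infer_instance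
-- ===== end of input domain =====

-- B records only syllable-break indices (plus the final segment start) in one pass and slices
-- the needed pieces from the names, instead of A's accumulator machine that builds every syllable string.


-- ===== PORT A =====
-- vowels = "aeiouAEIOU" (shared literal from both sources; 'char in vowels' on a single char is list membership)
def pvVowels : List Char := "aeiouAEIOU".toList

-- get_syllables' loop over (current, syllables); the trailing 'if current: append' is the base case
def pvSylLoop : List Char → List Char → List (List Char) → List (List Char)
  | [], cur, syls => if cur ≠ [] then syls ++ [cur] else syls
  | c :: rest, cur, syls =>
    let cur' := cur ++ [c]
    if c ∈ pvVowels ∧ 2 ≤ cur'.length then pvSylLoop rest [] (syls ++ [cur'])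
    else pvSylLoop rest cur' syls

def syllable_fusion_py (name1 : String) (name2 : String) : String :=
  let syl1 := pvSylLoop name1.toList [] []
  let syl2 := pvSylLoop name2.toList [] []
  if 2 ≤ syl1.length ∧ 2 ≤ syl2.length then
    -- syl1[0] and syl2[-1]; the branch guard makes both lookups succeed (Python would raise otherwise)
    String.ofList ((PySem.List.pyGet? syl1 0).getD [] ++ (PySem.List.pyGet? syl2 (-1)).getD [])
  else
    String.ofList (PySem.List.slice name1.toList none (some 3) ++ PySem.List.slice name2.toList (some (-3)) none)

-- ===== PORT B =====
-- enumerate(name) starting at n (hand port of Python's enumerate, exact)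
def pvEnumFrom : Nat → List Char → List (Nat × Char)
  | _, [] => []
  | n, c :: rest => (n, c) :: pvEnumFrom (n + 1) rest

-- breaks' loop over (bs, bound)
def pvBrkLoop : List (Nat × Char) → Nat → List Nat → (List Nat × Nat)
  | [], bound, bs => (bs, bound)
  | (i, c) :: rest, bound, bs =>
    if c ∈ pvVowels ∧ bound < i then pvBrkLoop rest (i + 1) (bs ++ [i])
    else pvBrkLoop rest bound bs

def syllable_fusion_py_alt (name1 : String) (name2 : String) : String :=
  let s1 := name1.toList
  let s2 := name2.toList
  let r1 := pvBrkLoop (pvEnumFrom 0 s1) 0 []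
  let r2 := pvBrkLoop (pvEnumFrom 0 s2) 0 []
  let count1 := r1.1.length + (if r1.2 < s1.length then 1 else 0)
  let count2 := r2.1.length + (if r2.2 < s2.length then 1 else 0)
  if 2 ≤ count1 ∧ 2 ≤ count2 then
    -- bs1[0] and bs2[-1]/bs2[-2]; the guard makes the lookups succeed (Python would raise otherwise)
    let first := PySem.List.slice s1 none (some (((PySem.List.pyGet? r1.1 0).getD 0 + 1 : Nat) : Int))
    let last :=
      if r2.2 < s2.length then PySem.List.slice s2 (some ((r2.2 : Nat) : Int)) none
      else PySem.List.slice s2 (some (((if 2 ≤ r2.1.length then (PySem.List.pyGet? r2.1 (-2)).getD 0 + 1 else 0 : Nat) : Int))) none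
    String.ofList (first ++ last)
  else
    String.ofList (PySem.List.slice s1 none (some 3) ++ PySem.List.slice s2 (some (-3)) none)

-- ===== PRECONDITION & SPEC =====
def Spec_syllable_fusion_py (name1 : String) (name2 : String) (out : String) : Prop := out = syllable_fusion_py_alt name1 name2
instance (name1 : String) (name2 : String) (out : String) : Decidable (Spec_syllable_fusion_py name1 name2 out) := by unfold Spec_syllable_fusion_py; infer_instance

-- ===== CLAIM (what is proved, stated in full; the proofs are below) =====
def Claim_equal_syllable_fusion_py : Prop := ∀ (name1 : String) (name2 : String), Dom_syllable_fusion_py name1 name2 → Spec_syllable_fusion_py name1 name2 (syllable_fusion_py name1 name2)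

-- ===== LEMMAS AND PROOFS =====

-- the syllable list determined by the break-index list bs: segments of cur ++ rest, rest starting at absolute index n
def pvG : List Nat → List Char → List Char → Nat → List (List Char)
  | [], cur, rest, _ => if cur ++ rest = [] then [] else [cur ++ rest]
  | b :: bs, cur, rest, n => (cur ++ rest.take (b + 1 - n)) :: pvG bs [] (rest.drop (b + 1 - n)) (b + 1)

-- well-formedness of a break list relative to start index n and remaining length L
def pvOk : List Nat → Nat → Nat → Prop
  | [], _, _ => True
  | b :: bs, n, L => n ≤ b ∧ b < n + L ∧ pvOk bs (b + 1) (L - (b + 1 - n))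

-- final bound determined by bs (bound if no break, last break + 1 otherwise)
def pvFb (bound : Nat) (bs : List Nat) : Nat := match bs.getLast? with | some b => b + 1 | none => bound

theorem pvFb_cons (bound b : Nat) (bs : List Nat) : pvFb bound (b :: bs) = pvFb (b + 1) bs := by
  cases bs <;> simp [pvFb, List.getLast?_cons]

theorem pvSylLoop_acc (rest : List Char) : ∀ (cur : List Char) (syls : List (List Char)),
    pvSylLoop rest cur syls = syls ++ pvSylLoop rest cur [] := by
  induction rest with
  | nil => intro cur syls; by_cases h : cur = [] <;> simp [pvSylLoop, h]
  | cons c rest ih =>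
    intro cur syls
    simp only [pvSylLoop]
    split
    · rw [ih [] (syls ++ [cur ++ [c]]), ih [] ([] ++ [cur ++ [c]])]; simp
    · exact ih _ _

theorem pvBrkLoop_acc (l : List (Nat × Char)) : ∀ (bound : Nat) (bs : List Nat),
    pvBrkLoop l bound bs = (bs ++ (pvBrkLoop l bound []).1, (pvBrkLoop l bound []).2) := by
  induction l with
  | nil => intro bound bs; simp [pvBrkLoop]
  | cons p rest ih =>
    intro bound bs
    obtain ⟨i, c⟩ := p
    simp only [pvBrkLoop]
    split
    · rw [ih (i + 1) (bs ++ [i]), ih (i + 1) ([] ++ [i])]; simp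
    · exact ih _ _

theorem pvOk_weaken (bs : List Nat) (n L : Nat) (h : pvOk bs (n + 1) L) : pvOk bs n (L + 1) := by
  cases bs with
  | nil => trivial
  | cons b bs =>
    obtain ⟨h1, h2, h3⟩ := h
    refine ⟨by omega, by omega, ?_⟩
    have : L + 1 - (b + 1 - n) = L - (b + 1 - (n + 1)) := by omega
    rw [this]; exact h3

theorem pvBrk_ok (rest : List Char) : ∀ (n bound : Nat),
    pvOk (pvBrkLoop (pvEnumFrom n rest) bound []).1 n rest.length := by
  induction rest with
  | nil => intro n bound; trivial
  | cons c rest ih =>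
    intro n bound
    simp only [pvEnumFrom, pvBrkLoop]
    split
    · rw [pvBrkLoop_acc]
      refine ⟨le_refl n, by simp, ?_⟩
      simp only [List.length_cons]
      have : rest.length + 1 - (n + 1 - n) = rest.length := by omega
      rw [this]; exact ih (n + 1) (n + 1)
    · simpa using pvOk_weaken _ n rest.length (ih (n + 1) bound)

theorem pvOk_ge (bs : List Nat) : ∀ (n L b : Nat), pvOk bs n L → b ∈ bs → n ≤ b := by
  induction bs with
  | nil => intro _ _ _ _ h; simp at h
  | cons x bs ih =>
    intro n L b hok hmem
    obtain ⟨h1, h2, h3⟩ := hok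
    rcases List.mem_cons.mp hmem with rfl | hmem
    · exact h1
    · exact le_trans (by omega) (ih (x + 1) _ b h3 hmem)

theorem pvBrk_fb (l : List (Nat × Char)) : ∀ (bound : Nat),
    (pvBrkLoop l bound []).2 = pvFb bound (pvBrkLoop l bound []).1 := by
  induction l with
  | nil => intro bound; simp [pvBrkLoop, pvFb]
  | cons p rest ih =>
    intro bound
    obtain ⟨i, c⟩ := p
    simp only [pvBrkLoop]
    split
    · rw [pvBrkLoop_acc]
      simp only
      rw [List.nil_append, List.singleton_append, pvFb_cons]
      exact ih (i + 1)
    · exact ih bound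

theorem pvG_shift (bs : List Nat) (cur : List Char) (c : Char) (rest : List Char) (n : Nat)
    (h : ∀ b ∈ bs, n + 1 ≤ b) :
    pvG bs cur (c :: rest) n = pvG bs (cur ++ [c]) rest (n + 1) := by
  cases bs with
  | nil => simp [pvG]
  | cons b bs =>
    have hb : n + 1 ≤ b := h b (List.mem_cons_self ..)
    have h1 : b + 1 - n = (b + 1 - (n + 1)) + 1 := by omega
    simp only [pvG, h1, List.take_succ_cons, List.drop_succ_cons]
    simp

theorem pvMain (rest : List Char) : ∀ (cur : List Char) (n : Nat), cur.length ≤ n →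
    pvSylLoop rest cur [] = pvG (pvBrkLoop (pvEnumFrom n rest) (n - cur.length) []).1 cur rest n := by
  induction rest with
  | nil =>
    intro cur n h
    by_cases hc : cur = [] <;> simp [pvSylLoop, pvBrkLoop, pvEnumFrom, pvG, hc]
  | cons c rest ih =>
    intro cur n h
    simp only [pvSylLoop, pvEnumFrom, pvBrkLoop, List.length_append, List.length_cons,
      List.length_nil]
    have hiff : (c ∈ pvVowels ∧ 2 ≤ cur.length + 1) ↔ (c ∈ pvVowels ∧ n - cur.length < n) := by
      constructor <;> (rintro ⟨h1, h2⟩; exact ⟨h1, by omega⟩)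
    by_cases hcond : c ∈ pvVowels ∧ 2 ≤ cur.length + 1
    · rw [if_pos (by simpa using hcond), if_pos (hiff.mp hcond)]
      rw [pvSylLoop_acc, pvBrkLoop_acc]
      simp only [List.singleton_append, List.nil_append]
      have := ih [] (n + 1) (by simp)
      simp only [List.length_nil, Nat.sub_zero] at this
      rw [this]
      simp [pvG]
    · rw [if_neg (by simpa using hcond), if_neg (fun hx => hcond (hiff.mpr hx))]
      have hb : n - cur.length = (n + 1) - (cur ++ [c]).length := by
        simp only [List.length_append, List.length_cons, List.length_nil]; omega
      rw [hb, ih (cur ++ [c]) (n + 1) (by simp; omega)]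
      rw [pvG_shift]
      intro b hbm
      exact pvOk_ge _ _ _ _ (pvBrk_ok rest (n + 1) ((n + 1) - (cur ++ [c]).length)) hbm

theorem pvG_length (bs : List Nat) : ∀ (cur rest : List Char) (n bound : Nat),
    pvOk bs n rest.length → bound + cur.length = n →
    (pvG bs cur rest n).length = bs.length + (if pvFb bound bs < n + rest.length then 1 else 0) := by
  induction bs with
  | nil =>
    intro cur rest n bound _ hbnd
    have hct : (cur ++ rest).length = cur.length + rest.length := List.length_append ..
    have hfb : pvFb bound ([] : List Nat) = bound := rfl
    by_cases hc : cur ++ rest = []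
    · have h0 : cur.length + rest.length = 0 := by rw [← hct, hc]; rfl
      have hcond : ¬ bound < n + rest.length := by omega
      simp [pvG, hc, hfb, hcond]
    · have h0 : 0 < cur.length + rest.length := by
        rcases Nat.eq_zero_or_pos (cur.length + rest.length) with h | h
        · exact absurd (List.eq_nil_of_length_eq_zero (by omega)) hc
        · exact h
      have hcond : bound < n + rest.length := by omega
      simp [pvG, hc, hfb, hcond]
  | cons b bs ih =>
    intro cur rest n bound hok hbnd
    obtain ⟨h1, h2, h3⟩ := hok
    simp only [pvG, List.length_cons, pvFb_cons]
    rw [ih [] (rest.drop (b + 1 - n)) (b + 1) (b + 1) (by simpa using h3) (by simp)]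
    have : b + 1 + (rest.drop (b + 1 - n)).length = n + rest.length := by
      simp [List.length_drop]; omega
    rw [this]
    omega

theorem getLast?_cons_ne {α : Type} (a : α) (l : List α) (h : l ≠ []) :
    (a :: l).getLast? = l.getLast? := by
  obtain ⟨z, hz⟩ := Option.isSome_iff_exists.mp (List.getLast?_isSome.mpr h)
  simp [List.getLast?_cons, hz]

theorem pvG_getLast_leftover (bs : List Nat) : ∀ (cur rest : List Char) (n bound : Nat),
    pvOk bs n rest.length → bound + cur.length = n → pvFb bound bs < n + rest.length →
    (pvG bs cur rest n).getLast? = some ((cur ++ rest).drop (pvFb bound bs - bound)) := by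
  induction bs with
  | nil =>
    intro cur rest n bound _ hbnd hlt
    have hfb : pvFb bound ([] : List Nat) = bound := rfl
    rw [hfb] at hlt ⊢
    have hne : cur ++ rest ≠ [] := by
      intro h
      have h0 : cur.length + rest.length = 0 := by
        have := congrArg List.length h; simpa using this
      omega
    simp [pvG, hne]
  | cons b bs ih =>
    intro cur rest n bound hok hbnd hlt
    obtain ⟨h1, h2, h3⟩ := hok
    rw [pvFb_cons] at hlt ⊢
    have hok' : pvOk bs (b + 1) (rest.drop (b + 1 - n)).length := by simpa using h3
    have hlen : b + 1 + (rest.drop (b + 1 - n)).length = n + rest.length := by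
      simp [List.length_drop]; omega
    simp only [pvG]
    rw [getLast?_cons_ne]
    · rw [ih [] (rest.drop (b + 1 - n)) (b + 1) (b + 1) hok' (by simp) (by omega)]
      have hfb : b + 1 ≤ pvFb (b + 1) bs := by
        unfold pvFb
        cases hgl : bs.getLast? with
        | none => simp
        | some z =>
          have hz := pvOk_ge bs (b + 1) _ z hok' (List.mem_of_getLast? hgl)
          simp
          omega
      congr 1
      rw [List.nil_append, List.drop_drop]
      have hidx : pvFb (b + 1) bs - bound = cur.length + (pvFb (b + 1) bs - n) := by omega
      rw [hidx, List.drop_length_add_append]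
      congr 1
      omega
    · have hlg := pvG_length bs [] (rest.drop (b + 1 - n)) (b + 1) (b + 1) hok' (by simp)
      have hcond : pvFb (b + 1) bs < b + 1 + (rest.drop (b + 1 - n)).length := by omega
      rw [if_pos hcond] at hlg
      intro hnil
      rw [hnil] at hlg
      simp at hlg

theorem pvG_getLast_full (bs'' : List Nat) : ∀ (p q : Nat) (cur rest : List Char) (n bound : Nat),
    pvOk (bs'' ++ [p, q]) n rest.length → bound + cur.length = n →
    ¬ pvFb bound (bs'' ++ [p, q]) < n + rest.length →
    (pvG (bs'' ++ [p, q]) cur rest n).getLast? = some (rest.drop (p + 1 - n)) := by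
  induction bs'' with
  | nil =>
    intro p q cur rest n bound hok hbnd hnl
    simp only [List.nil_append] at hok hnl ⊢
    obtain ⟨h1, h2, h3, h4, -⟩ := hok
    have hfb : pvFb bound [p, q] = q + 1 := by simp [pvFb]
    rw [hfb] at hnl
    have hq : q + 1 = n + rest.length := by omega
    simp only [pvG]
    have h5 : ((rest.drop (p + 1 - n)).drop (q + 1 - (p + 1))) = [] := by
      apply List.eq_nil_of_length_eq_zero
      simp only [List.length_drop]
      omega
    rw [h5]
    simp only [List.nil_append, List.append_nil, if_true, List.getLast?_cons, List.getLast?_nil,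
      Option.getD_none, Option.getD_some]
    congr 1
    apply List.take_of_length_le
    simp only [List.length_drop]
    omega
  | cons b bs'' ih =>
    intro p q cur rest n bound hok hbnd hnl
    simp only [List.cons_append] at hok hnl ⊢
    obtain ⟨h1, h2, h3⟩ := hok
    have hok' : pvOk (bs'' ++ [p, q]) (b + 1) (rest.drop (b + 1 - n)).length := by simpa using h3
    have hlen : b + 1 + (rest.drop (b + 1 - n)).length = n + rest.length := by
      simp [List.length_drop]; omega
    rw [pvFb_cons] at hnl
    have hnl' : ¬ pvFb (b + 1) (bs'' ++ [p, q]) < b + 1 + (rest.drop (b + 1 - n)).length := by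
      omega
    have hp : b + 1 ≤ p := pvOk_ge _ _ _ p hok' (by simp)
    simp only [pvG]
    rw [getLast?_cons_ne]
    · rw [ih p q [] (rest.drop (b + 1 - n)) (b + 1) (b + 1) hok' (by simp) hnl']
      rw [List.drop_drop]
      congr 2
      omega
    · intro hnil
      have hlg := pvG_length (bs'' ++ [p, q]) [] (rest.drop (b + 1 - n)) (b + 1) (b + 1) hok' (by simp)
      rw [hnil] at hlg
      simp only [List.length_nil, List.length_append, List.length_cons] at hlg
      omega

-- Python-indexing bridges
theorem pvPyGet_zero {α : Type} (xs : List α) : PySem.List.pyGet? xs 0 = xs.head? := by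
  rcases xs with _ | ⟨a, l⟩ <;> simp [PySem.List.pyGet?, PySem.List.pyIdx?]

theorem pvPyGet_neg_one {α : Type} (xs : List α) : PySem.List.pyGet? xs (-1) = xs.getLast? := by
  rcases xs with _ | ⟨a, l⟩
  · simp [PySem.List.pyGet?, PySem.List.pyIdx?]
  · simp [PySem.List.pyGet?, PySem.List.pyIdx?]
    rw [List.getLast?_eq_getElem?]
    simp

theorem pvPyGet_neg_two {α : Type} (l : List α) (p q : α) :
    PySem.List.pyGet? (l ++ [p, q]) (-2) = some p := by
  simp [PySem.List.pyGet?, PySem.List.pyIdx?]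

theorem pvExists_two {α : Type} : ∀ (l : List α), 2 ≤ l.length → ∃ l' p q, l = l' ++ [p, q]
  | [], h => by simp at h
  | [a], h => by simp at h
  | [a, b], _ => ⟨[], a, b, rfl⟩
  | a :: b :: c :: t, _ => by
    obtain ⟨l', p, q, hl⟩ := pvExists_two (b :: c :: t) (by simp)
    exact ⟨a :: l', p, q, by rw [List.cons_append, ← hl]⟩

-- the per-name facts bundled: syllable list, break list and final bound of one name
theorem pvName_facts (s : List Char) :
    pvSylLoop s [] [] = pvG (pvBrkLoop (pvEnumFrom 0 s) 0 []).1 [] s 0 ∧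
    pvOk (pvBrkLoop (pvEnumFrom 0 s) 0 []).1 0 s.length ∧
    (pvBrkLoop (pvEnumFrom 0 s) 0 []).2 = pvFb 0 (pvBrkLoop (pvEnumFrom 0 s) 0 []).1 := by
  refine ⟨?_, pvBrk_ok s 0 0, pvBrk_fb _ 0⟩
  simpa using pvMain s [] 0 (by simp)

theorem pvEquiv (name1 name2 : String) :
    syllable_fusion_py name1 name2 = syllable_fusion_py_alt name1 name2 := by
  unfold syllable_fusion_py syllable_fusion_py_alt
  obtain ⟨hsyl1, hok1, hfb1⟩ := pvName_facts name1.toList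
  obtain ⟨hsyl2, hok2, hfb2⟩ := pvName_facts name2.toList
  set s1 := name1.toList with hs1
  set s2 := name2.toList with hs2
  set r1 := pvBrkLoop (pvEnumFrom 0 s1) 0 [] with hr1
  set r2 := pvBrkLoop (pvEnumFrom 0 s2) 0 [] with hr2
  have hlen1 := pvG_length r1.1 [] s1 0 0 hok1 (by simp)
  have hlen2 := pvG_length r2.1 [] s2 0 0 hok2 (by simp)
  simp only [Nat.zero_add] at hlen1 hlen2
  -- the two branch conditions agree
  have hcount1 : (pvSylLoop s1 [] []).length = r1.1.length + (if r1.2 < s1.length then 1 else 0) := by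
    rw [hsyl1, hlen1, hfb1]
  have hcount2 : (pvSylLoop s2 [] []).length = r2.1.length + (if r2.2 < s2.length then 1 else 0) := by
    rw [hsyl2, hlen2, hfb2]
  by_cases hc : 2 ≤ r1.1.length + (if r1.2 < s1.length then 1 else 0) ∧
      2 ≤ r2.1.length + (if r2.2 < s2.length then 1 else 0)
  · rw [if_pos (by rw [hcount1, hcount2]; exact hc), if_pos hc]
    obtain ⟨hc1, hc2⟩ := hc
    congr 1
    -- bs1 is nonempty
    have hne1 : r1.1 ≠ [] := by
      intro h; rw [h] at hc1; simp at hc1; split at hc1 <;> omega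
    obtain ⟨b1, t1, hb1⟩ := List.exists_cons_of_ne_nil hne1
    have hfirst : (PySem.List.pyGet? (pvSylLoop s1 [] []) 0).getD [] =
        PySem.List.slice s1 none (some (((PySem.List.pyGet? r1.1 0).getD 0 + 1 : Nat) : Int)) := by
      rw [pvPyGet_zero, pvPyGet_zero, hsyl1, hb1]
      simp only [pvG, List.head?_cons, Option.getD_some, List.nil_append, Nat.sub_zero]
      rw [PySem.List.slice_to_natCast]
    rw [hfirst]
    congr 1
    -- last syllable
    by_cases hl : r2.2 < s2.length
    · rw [if_pos hl]
      rw [pvPyGet_neg_one, hsyl2]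
      rw [pvG_getLast_leftover r2.1 [] s2 0 0 hok2 (by simp) (by rw [← hfb1] at *; rw [← hfb2]; simpa using hl)]
      rw [PySem.List.slice_from_natCast]
      simp only [List.nil_append, Nat.sub_zero, Option.getD_some]
      rw [hfb2]
    · rw [if_neg hl]
      have hc2' : 2 ≤ r2.1.length := by rw [if_neg hl] at hc2; simpa using hc2
      obtain ⟨l2, p, q, hpq⟩ := pvExists_two r2.1 hc2'
      have hif : (if 2 ≤ r2.1.length then (PySem.List.pyGet? r2.1 (-2)).getD 0 + 1 else 0) = p + 1 := by
        rw [if_pos hc2', hpq, pvPyGet_neg_two, Option.getD_some]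
      have hnl2 : ¬ pvFb 0 (l2 ++ [p, q]) < 0 + s2.length := by
        rw [hfb2, hpq] at hl; simpa using hl
      rw [hif, PySem.List.slice_from_natCast, pvPyGet_neg_one, hsyl2, hpq]
      rw [pvG_getLast_full l2 p q [] s2 0 0 (hpq ▸ hok2) (by simp) hnl2]
      simp
  · rw [if_neg (by rw [hcount1, hcount2]; exact hc), if_neg hc]

-- ===== VERDICT (by name: the statement is the Claim_ definition above) =====
theorem syllable_fusion_py_spec : Claim_equal_syllable_fusion_py := by
  unfold Claim_equal_syllable_fusion_py
  intro name1 name2 _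
  unfold Spec_syllable_fusion_py
  exact pvEquiv name1 name2
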